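-- pv_equiv track=rewrite | github.com/sean-lo/staircase_boolean | staircase_resnet_tests_multi.py | is_stair_coeff
-- ===== SOURCE A (Python) =====
-- def is_stair_coeff(tup):
--     isOne = False
--     for j in tup:
--         if j == 1:
--             isOne = True
--         else:
--             if isOne:
--                 return False
--     return True
-- ===== SOURCE B (Python) =====
-- def is_stair_coeff(tup):
--     if 1 not in tup:
--         return True
--     i = tup.index(1)
--     return all(x == 1 for x in tup[i+1:])
-- ===== Notes on version B (the rewrite author's own statement) =====
-- stated objective: alternative
-- what changed: Replaced A's flag-carrying single pass with two phases: locate the first 1 with tup.index, then check that the suffix after it is all ones.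
import Mathlib
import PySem

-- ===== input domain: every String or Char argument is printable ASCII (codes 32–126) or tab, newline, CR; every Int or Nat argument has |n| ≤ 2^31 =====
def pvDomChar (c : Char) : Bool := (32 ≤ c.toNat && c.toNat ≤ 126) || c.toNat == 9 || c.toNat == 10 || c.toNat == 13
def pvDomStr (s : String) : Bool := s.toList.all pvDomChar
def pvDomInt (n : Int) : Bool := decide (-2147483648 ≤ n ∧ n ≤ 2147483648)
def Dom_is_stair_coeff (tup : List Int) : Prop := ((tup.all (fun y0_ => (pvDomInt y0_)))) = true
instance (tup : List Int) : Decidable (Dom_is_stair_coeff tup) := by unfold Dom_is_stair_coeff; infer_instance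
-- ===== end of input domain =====

-- B replaces A's flag-carrying single pass by two phases (find the first 1, then check the suffix); alternative decomposition, same cost.

-- ===== PORT A =====
-- A's loop with early return, carrying the isOne flag.
def isStairLoop (isOne : Bool) : List Int → Bool
  | [] => true
  | j :: rest =>
      if j = 1 then isStairLoop true rest
      else if isOne then false
      else isStairLoop isOne rest

def is_stair_coeff (tup : List Int) : Bool := isStairLoop false tup

-- ===== PORT B =====
def is_stair_coeff_alt (tup : List Int) : Bool :=
  if (1 : Int) ∈ tup then
    match PySem.List.index? tup (1 : Int) with
    | some i => (PySem.List.slice tup (some ((i : Int) + 1)) none).all (· == 1)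
    | none => true
  else true

-- ===== PRECONDITION & SPEC =====
def Spec_is_stair_coeff (tup : List Int) (out : Bool) : Prop := out = is_stair_coeff_alt tup
instance (tup : List Int) (out : Bool) : Decidable (Spec_is_stair_coeff tup out) := by unfold Spec_is_stair_coeff; infer_instance

-- ===== CLAIM (what is proved, stated in full; the proofs are below) =====
def Claim_equal_is_stair_coeff : Prop := ∀ (tup : List Int), Dom_is_stair_coeff tup → Spec_is_stair_coeff tup (is_stair_coeff tup)

-- ===== LEMMAS AND PROOFS =====

-- once the flag is set, A's loop just checks all-ones
theorem isStairLoop_true (l : List Int) : isStairLoop true l = l.all (· == 1) := by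
  induction l with
  | nil => rfl
  | cons j rest ih =>
      by_cases hj : j = 1 <;> simp [isStairLoop, hj, ih]

theorem isStair_eq_alt (tup : List Int) : isStairLoop false tup = is_stair_coeff_alt tup := by
  induction tup with
  | nil => rfl
  | cons j rest ih =>
      by_cases hj : j = 1
      · subst hj
        rw [show isStairLoop false (1 :: rest) = isStairLoop true rest from by
            simp [isStairLoop], isStairLoop_true]
        simp only [is_stair_coeff_alt, List.mem_cons, true_or, if_true,
          PySem.List.index?_cons_self]
        have h0 : PySem.List.slice (1 :: rest) (some (((0 : Nat) : Int) + 1)) none = rest := by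
          rw [show (((0 : Nat) : Int) + 1) = (((1 : Nat) : Int)) by norm_num,
            PySem.List.slice_from_natCast]
          rfl
        rw [h0]
      · rw [show isStairLoop false (j :: rest) = isStairLoop false rest from by
            simp [isStairLoop, hj], ih]
        by_cases hm : (1 : Int) ∈ rest
        · obtain ⟨i, hi⟩ := Option.isSome_iff_exists.mp
            ((PySem.List.index?_isSome_iff rest (1 : Int)).mpr hm)
          have hcons : PySem.List.index? (j :: rest) (1 : Int) = some (i + 1) := by
            rw [PySem.List.index?_cons_of_ne rest hj, hi]; rfl
          have hmj : (1 : Int) ∈ j :: rest := List.mem_cons_of_mem _ hm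
          simp only [is_stair_coeff_alt, if_pos hm, if_pos hmj, hi, hcons]
          have h1 : PySem.List.slice (j :: rest) (some (((i + 1 : Nat) : Int) + 1)) none
              = rest.drop (i + 1) := by
            rw [show (((i + 1 : Nat) : Int) + 1) = (((i + 2 : Nat) : Int)) by push_cast; ring,
              PySem.List.slice_from_natCast]
            rfl
          have h2 : PySem.List.slice rest (some (((i : Nat) : Int) + 1)) none
              = rest.drop (i + 1) := by
            rw [show (((i : Nat) : Int) + 1) = (((i + 1 : Nat) : Int)) by push_cast; ring,
              PySem.List.slice_from_natCast]
          rw [h1, h2]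
        · have hmj : (1 : Int) ∉ j :: rest := by
            simp [List.mem_cons, hm, Ne.symm hj]
          simp [is_stair_coeff_alt, hm, hmj]

-- ===== VERDICT (by name: the statement is the Claim_ definition above) =====
theorem is_stair_coeff_spec : Claim_equal_is_stair_coeff := by
  intro tup _
  unfold Spec_is_stair_coeff is_stair_coeff
  exact isStair_eq_alt tup
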